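-- pv_equiv track=rewrite | github.com/Ajay-Zad/GeeksForGeeks-Coding-Files | Drive the car.py | required
-- ===== SOURCE A (Python) =====
-- def required(a, n, k):
--     # Your code goes here
--     cnt = 0
--     l = []
--     for i in a:
--         if i <= k:
--             pass
--         else:
--             cnt = (i-k)
--             l.append(cnt)
--             k = i
--
--     if cnt > 0:
--         return sum(l)
--     else:
--         return -1
-- ===== SOURCE B (Python) =====
-- def required(a, n, k):
--     if not a:
--         return -1
--     m = max(a)
--     return m - k if m > k else -1
-- ===== Notes on version B (the rewrite author's own statement) =====
-- stated objective: simpler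
-- what changed: Replaces the scan that accumulates incremental top-ups over the running maximum (plus a final sum over the collected list) with the closed form max(a)-k when max(a)>k else -1, since the increments telescope.
import Mathlib
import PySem

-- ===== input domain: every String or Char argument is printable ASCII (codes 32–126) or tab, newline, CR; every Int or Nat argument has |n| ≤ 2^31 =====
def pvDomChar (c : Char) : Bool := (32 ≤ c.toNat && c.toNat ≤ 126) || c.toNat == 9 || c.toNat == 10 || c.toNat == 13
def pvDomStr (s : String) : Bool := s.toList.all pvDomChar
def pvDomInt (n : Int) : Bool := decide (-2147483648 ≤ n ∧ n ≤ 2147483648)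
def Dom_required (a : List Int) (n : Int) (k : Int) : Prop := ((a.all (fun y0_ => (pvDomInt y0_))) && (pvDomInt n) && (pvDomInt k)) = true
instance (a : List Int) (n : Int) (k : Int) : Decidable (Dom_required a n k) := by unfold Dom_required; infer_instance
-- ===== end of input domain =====

-- B replaces A's scan that accumulates incremental top-ups (and a final sum over
-- the collected list) with the closed form max(a) - k when max(a) > k, else -1.

-- ===== PORT A =====
-- loop body: state is (cnt, l, k); 'if i <= k: pass else: cnt = i-k; l.append(cnt); k = i'
def requiredStep (s : Int × List Int × Int) (i : Int) : Int × List Int × Int :=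
  if i ≤ s.2.2 then s else (i - s.2.2, s.2.1 ++ [i - s.2.2], i)

def required (a : List Int) (n : Int) (k : Int) : Int :=
  let s := a.foldl requiredStep (0, [], k)
  if s.1 > 0 then s.2.1.sum else -1

-- ===== PORT B =====
def required_alt (a : List Int) (n : Int) (k : Int) : Int :=
  if a = [] then -1
  else
    match PySem.List.max? a (fun y => y) with
    | none => -1
    | some m => if m > k then m - k else -1

-- ===== PRECONDITION & SPEC =====
def Spec_required (a : List Int) (n : Int) (k : Int) (out : Int) : Prop := out = required_alt a n k
instance (a : List Int) (n : Int) (k : Int) (out : Int) : Decidable (Spec_required a n k out) := by unfold Spec_required; infer_instance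

-- ===== CLAIM (what is proved, stated in full; the proofs are below) =====
def Claim_equal_required : Prop := ∀ (a : List Int) (n : Int) (k : Int), Dom_required a n k → Spec_required a n k (required a n k)

-- ===== LEMMAS AND PROOFS =====

lemma foldl_max_pull (t : List Int) : ∀ (a b : Int), t.foldl max (max a b) = max a (t.foldl max b) := by
  induction t with
  | nil => intro a b; rfl
  | cons c t ih =>
    intro a b
    simp only [List.foldl_cons, max_assoc, ih]

/-- Invariant of A's loop: the running `k` is the running maximum, the collected
increments telescope, and `cnt > 0` exactly when `k` strictly increased. -/
lemma required_loop_inv (a : List Int) : ∀ (c : Int) (l : List Int) (k : Int),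
    (a.foldl requiredStep (c, l, k)).2.2 = a.foldl max k ∧
    (a.foldl requiredStep (c, l, k)).2.1.sum
      = l.sum + ((a.foldl requiredStep (c, l, k)).2.2 - k) ∧
    ((a.foldl requiredStep (c, l, k)).2.2 = k → (a.foldl requiredStep (c, l, k)).1 = c) ∧
    (k < (a.foldl requiredStep (c, l, k)).2.2 → 0 < (a.foldl requiredStep (c, l, k)).1) := by
  induction a with
  | nil => intro c l k; refine ⟨rfl, by simp, fun _ => rfl, fun h => absurd h (lt_irrefl k)⟩
  | cons i t ih =>
    intro c l k
    by_cases hik : i ≤ k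
    · have hs : requiredStep (c, l, k) i = (c, l, k) := by
        simp [requiredStep, hik]
      have hm : max k i = k := max_eq_left hik
      simpa [List.foldl_cons, hs, hm] using ih c l k
    · have hki : k < i := lt_of_not_ge hik
      have hs : requiredStep (c, l, k) i = (i - k, l ++ [i - k], i) := by
        simp [requiredStep, hik]
      have hm : max k i = i := max_eq_right (le_of_lt hki)
      obtain ⟨h1, h2, h3, h4⟩ := ih (i - k) (l ++ [i - k]) i
      have hge : i ≤ t.foldl max i := (PySem.List.le_foldl_max t i).1
      refine ⟨by simp [List.foldl_cons, hs, hm, h1], ?_, ?_, ?_⟩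
      · simp only [List.foldl_cons, hs]
        rw [h2]; simp [h1]; omega
      · intro hk
        exfalso
        simp only [List.foldl_cons, hs] at hk
        rw [h1] at hk
        omega
      · intro _
        simp only [List.foldl_cons, hs]
        rcases eq_or_lt_of_le hge with he | hlt
        · have := h3 (by rw [h1, ← he])
          rw [this]; omega
        · exact h4 (by rw [h1]; exact hlt)

-- ===== VERDICT (by name: the statement is the Claim_ definition above) =====
theorem required_spec : Claim_equal_required := by
  intro a n k _
  unfold Spec_required required required_alt
  cases a with
  | nil => simp
  | cons x t =>
    obtain ⟨h1, h2, h3, h4⟩ := required_loop_inv (x :: t) 0 [] k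
    have hmax : PySem.List.max? (x :: t) (fun y => y) = some (t.foldl max x) :=
      PySem.List.max?_id_cons x t
    have hfold : (x :: t).foldl max k = max k (t.foldl max x) := by
      simp only [List.foldl_cons]
      simpa using foldl_max_pull t k x
    simp only [hmax]
    by_cases hmk : t.foldl max x > k
    · have hgt : k < (x :: t).foldl max k := by rw [hfold]; omega
      rw [h1] at h4
      have hc := h4 hgt
      rw [if_pos hc, if_neg (List.cons_ne_nil x t), if_pos hmk, h2, h1, hfold]
      simp
      omega
    · have heq : (x :: t).foldl max k = k := by rw [hfold]; omega
      have hc := h3 (by rw [h1]; exact heq)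
      rw [hc]
      simp [hmk]
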